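-- pv_equiv track=rewrite | github.com/Pahul0516/Facultate | Anul1/Semestrul_1/Fundamentele_programarii/Proiecte/Aplicatie lab 13/Problema_8.py | cond
-- ===== SOURCE A (Python) =====
-- def cond(lista):
--     prev=[]
--     prev.append(0)
--     prev=prev+lista
--     prev.append(0)
--
--     for i in range(0,len(prev)-1):
--         if not(abs(prev[i+1]-prev[i])==1 or abs(prev[i+1]-prev[i])==2):
--             return False
--     return True
-- ===== SOURCE B (Python) =====
-- def cond(lista):
--     # Recursive formulation with a carried "previous" value: no padded list is
--     # ever built. go(prev, rest) checks the step from prev into rest and,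
--     # when the list ends, the final step back to the implicit trailing 0.
--     def go(prev, rest):
--         if not rest:
--             return abs(prev) in (1, 2)
--         return abs(rest[0] - prev) in (1, 2) and go(rest[0], rest[1:])
--     return go(0, lista)
-- ===== Notes on version B (the rewrite author's own statement) =====
-- stated objective: alternative
-- what changed: Replaces A's build-a-padded-list-then-index-scan with a direct recursion over the input that carries the previous value (starting at the implicit 0) and checks the final step to the trailing 0 in its base case, so no padded list or index arithmetic exists.
import Mathlib
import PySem

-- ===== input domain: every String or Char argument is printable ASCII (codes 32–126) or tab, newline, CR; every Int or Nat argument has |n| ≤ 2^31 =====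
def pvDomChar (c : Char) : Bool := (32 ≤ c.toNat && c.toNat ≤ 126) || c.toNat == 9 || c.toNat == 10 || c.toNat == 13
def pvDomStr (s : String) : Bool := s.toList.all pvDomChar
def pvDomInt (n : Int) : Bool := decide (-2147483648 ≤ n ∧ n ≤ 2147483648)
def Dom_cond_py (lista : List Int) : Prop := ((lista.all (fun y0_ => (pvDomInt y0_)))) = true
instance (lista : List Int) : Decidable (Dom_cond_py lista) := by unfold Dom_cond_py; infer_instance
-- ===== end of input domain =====

-- B replaces A's padded-list index scan by a recursion over the input carrying the
-- previous value, with the trailing 0 handled in the base case (objective: alternative).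


-- ===== PORT A =====
-- the for-loop over range(0, len(prev)-1) with its early 'return False'
def condLoopA (prev : List Int) : List Int → Bool
  | [] => true
  | i :: rest =>
    if ¬(|PySem.List.pyGetD prev (i + 1) 0 - PySem.List.pyGetD prev i 0| = 1 ∨
          |PySem.List.pyGetD prev (i + 1) 0 - PySem.List.pyGetD prev i 0| = 2) then
      false
    else
      condLoopA prev rest

def cond_py (lista : List Int) : Bool :=
  let prev : List Int := ([0] ++ lista) ++ [0]
  condLoopA prev (PySem.List.pyRange 0 ((prev.length : Int) - 1) 1)

-- ===== PORT B =====
-- go(prev, rest): base case checks the final step to the implicit trailing 0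
def condGoB (prev : Int) : List Int → Bool
  | [] => decide (|prev| = 1 ∨ |prev| = 2)
  | x :: rest => decide (|x - prev| = 1 ∨ |x - prev| = 2) && condGoB x rest

def cond_py_alt (lista : List Int) : Bool := condGoB 0 lista

-- ===== PRECONDITION & SPEC =====
def Spec_cond_py (lista : List Int) (out : Bool) : Prop := out = cond_py_alt lista
instance (lista : List Int) (out : Bool) : Decidable (Spec_cond_py lista out) := by unfold Spec_cond_py; infer_instance

-- ===== CLAIM (what is proved, stated in full; the proofs are below) =====
def Claim_equal_cond_py : Prop := ∀ (lista : List Int), Dom_cond_py lista → Spec_cond_py lista (cond_py lista)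

-- ===== LEMMAS AND PROOFS =====

def okPair (p : Int × Int) : Bool := |p.2 - p.1| = 1 ∨ |p.2 - p.1| = 2

-- A's loop from index k onward checks exactly the adjacent pairs of the suffix
lemma loopA_spec (prev : List Int) :
    ∀ (n k : Nat), prev.length - k = n →
      condLoopA prev (PySem.List.pyRange (k : Int) ((prev.length : Int) - 1) 1) =
        ((prev.drop k).zip (prev.drop k).tail).all okPair := by
  intro n
  induction n with
  | zero =>
    intro k hk
    have hlen : prev.length ≤ k := by omega
    rw [PySem.List.pyRange_one_eq_nil (by omega)]
    rw [List.drop_eq_nil_of_le hlen]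
    rfl
  | succ n ih =>
    intro k hk
    by_cases h : k + 1 < prev.length
    · rw [PySem.List.pyRange_one_cons (by omega)]
      have hk1 : ((k : Int) + 1) = ((k + 1 : Nat) : Int) := by push_cast; ring
      have e1 : PySem.List.pyGetD prev ((k : Int) + 1) 0 = prev.getD (k + 1) 0 := by
        rw [hk1, PySem.List.pyGetD_natCast]
      have e0 : PySem.List.pyGetD prev (k : Int) 0 = prev.getD k 0 := by
        rw [PySem.List.pyGetD_natCast]
      have hdk : prev.drop k = prev[k] :: prev.drop (k + 1) :=
        List.drop_eq_getElem_cons (by omega)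
      have hdk1 : prev.drop (k + 1) = prev[k + 1] :: prev.drop (k + 2) :=
        List.drop_eq_getElem_cons h
      have hg0 : prev.getD k 0 = prev[k] := List.getD_eq_getElem _ _ (by omega)
      have hg1 : prev.getD (k + 1) 0 = prev[k + 1] := List.getD_eq_getElem _ _ h
      show (if _ then _ else _) = _
      rw [e1, e0, hg0, hg1, hdk, hdk1]
      have hrec := ih (k + 1) (by omega)
      rw [hk1, hrec, hdk1]
      simp only [List.tail_cons, List.zip_cons_cons, List.all_cons, okPair]
      by_cases hc : |prev[k + 1] - prev[k]| = 1 ∨ |prev[k + 1] - prev[k]| = 2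
      · simp [hc]
      · simp [hc]
    · rw [PySem.List.pyRange_one_eq_nil (by omega)]
      have : (prev.drop k).length ≤ 1 := by
        simp [List.length_drop]; omega
      match hd : prev.drop k with
      | [] => rfl
      | [x] => rfl
      | x :: y :: rest => rw [hd] at this; simp at this

-- the all-adjacent-pairs form of the padded list equals B's carried-previous recursion
lemma pairs_eq_go (l : List Int) :
    ∀ prev : Int,
      ((prev :: (l ++ [0])).zip (l ++ [0])).all okPair = condGoB prev l := by
  induction l with
  | nil =>
    intro prev
    simp [okPair, condGoB]
  | cons x rest ih =>
    intro prev
    simp only [List.cons_append, List.zip_cons_cons, List.all_cons, condGoB, okPair]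
    rw [ih x]

-- ===== VERDICT (by name: the statement is the Claim_ definition above) =====
theorem cond_py_spec : Claim_equal_cond_py := by
  intro lista _
  unfold Spec_cond_py cond_py_alt
  show condLoopA (([0] ++ lista) ++ [0])
      (PySem.List.pyRange 0 ((((([0] ++ lista) ++ [0]).length : Nat) : Int) - 1) 1) = _
  have h := loopA_spec (([0] ++ lista) ++ [0]) ((([0] ++ lista) ++ [0]).length) 0 rfl
  simp only [Nat.cast_zero, List.drop_zero] at h
  rw [h]
  have hsh : (([0] ++ lista) ++ [0] : List Int) = (0 : Int) :: (lista ++ [0]) := by simp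
  rw [hsh]
  simpa using pairs_eq_go lista 0
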